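-- pv_equiv track=rewrite | github.com/fiberseq/FiberHMM | fiberhmm/io/ma_tags.py | format_ma_tag
-- ===== SOURCE A (Python) =====
-- from typing import Iterable, List, Sequence, Tuple
--
-- def format_ma_tag(read_length: int,
--                   nuc_intervals: Sequence[Tuple[int, int]],
--                   msp_intervals: Sequence[Tuple[int, int]],
--                   tf_intervals: Sequence[Tuple[int, int]] = (),
--                   nuc_qual_spec: str = 'Q',
--                   tf_qual_spec: str = 'QQQ') -> str:
--     """Build the MA:Z string per the fiberseq Molecular-annotation spec.
--
--     Coordinates are converted from 0-based (internal) to 1-based (spec).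
--     """
--     parts = [str(int(read_length))]
--     if nuc_intervals:
--         nucs = ','.join(f'{int(s) + 1}-{int(l)}' for s, l in nuc_intervals)
--         parts.append(f'nuc+{nuc_qual_spec}:{nucs}' if nuc_qual_spec
--                      else f'nuc+:{nucs}')
--     if msp_intervals:
--         msps = ','.join(f'{int(s) + 1}-{int(l)}' for s, l in msp_intervals)
--         parts.append(f'msp+:{msps}')
--     if tf_intervals:
--         tfs = ','.join(f'{int(s) + 1}-{int(l)}' for s, l in tf_intervals)
--         parts.append(f'tf+{tf_qual_spec}:{tfs}' if tf_qual_spec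
--                      else f'tf+:{tfs}')
--     return ';'.join(parts)
-- ===== SOURCE B (Python) =====
-- def format_ma_tag(read_length,
--                   nuc_intervals,
--                   msp_intervals,
--                   tf_intervals=(),
--                   nuc_qual_spec='Q',
--                   tf_qual_spec='QQQ'):
--     # Build the tag back-to-front by recursion: no parts list, no join.
--     def spans(ivs):
--         (s, l), rest = ivs[0], ivs[1:]
--         head = f'{int(s) + 1}-{int(l)}'
--         return head if not rest else head + ',' + spans(rest)
--
--     def section(prefix, ivs, qual, suffix):
--         if not ivs:
--             return suffix
--         return ';' + prefix + '+' + qual + ':' + spans(ivs) + suffix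
--
--     tail = section('tf', tf_intervals, tf_qual_spec, '')
--     tail = section('msp', msp_intervals, '', tail)
--     tail = section('nuc', nuc_intervals, nuc_qual_spec, tail)
--     return str(int(read_length)) + tail
-- ===== Notes on version B (the rewrite author's own statement) =====
-- stated objective: alternative
-- what changed: Builds the tag back-to-front by recursion: a recursive spans() concatenates each interval body onto the rest with ',' and a recursive section descent prepends each ';prefix+qual:body' directly onto the already-built suffix string, eliminating A's parts list and both ','.join/';'.join passes.
import Mathlib
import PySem

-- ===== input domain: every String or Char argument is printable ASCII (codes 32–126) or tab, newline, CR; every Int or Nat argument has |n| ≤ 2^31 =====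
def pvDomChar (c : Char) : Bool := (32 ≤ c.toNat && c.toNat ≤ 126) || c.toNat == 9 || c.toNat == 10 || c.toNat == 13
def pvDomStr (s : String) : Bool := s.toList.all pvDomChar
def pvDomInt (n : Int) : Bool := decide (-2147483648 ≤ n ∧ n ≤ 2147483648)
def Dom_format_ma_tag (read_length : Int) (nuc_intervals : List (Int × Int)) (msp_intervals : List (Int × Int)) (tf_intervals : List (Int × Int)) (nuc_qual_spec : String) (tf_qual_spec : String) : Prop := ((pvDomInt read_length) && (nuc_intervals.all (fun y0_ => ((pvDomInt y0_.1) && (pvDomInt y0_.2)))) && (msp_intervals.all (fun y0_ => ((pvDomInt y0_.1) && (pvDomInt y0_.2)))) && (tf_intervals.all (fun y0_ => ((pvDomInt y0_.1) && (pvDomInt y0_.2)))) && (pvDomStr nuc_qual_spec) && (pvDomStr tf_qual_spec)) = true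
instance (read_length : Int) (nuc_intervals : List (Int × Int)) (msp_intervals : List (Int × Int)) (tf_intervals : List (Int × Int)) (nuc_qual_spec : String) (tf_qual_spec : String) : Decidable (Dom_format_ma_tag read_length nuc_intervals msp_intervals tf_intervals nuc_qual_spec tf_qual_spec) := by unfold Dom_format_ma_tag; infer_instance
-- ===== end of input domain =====

-- B builds the MA:Z string back-to-front by recursion (no parts list, no joins): a different decomposition, same cost.



-- ===== PORT A =====
def format_ma_tag (read_length : Int) (nuc_intervals : List (Int × Int)) (msp_intervals : List (Int × Int)) (tf_intervals : List (Int × Int)) (nuc_qual_spec : String) (tf_qual_spec : String) : String :=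
  let parts := [PySem.Int.toStr read_length]
  let parts :=
    if !nuc_intervals.isEmpty then
      let nucs := PySem.Str.join "," (nuc_intervals.map (fun p => PySem.Int.toStr (p.1 + 1) ++ "-" ++ PySem.Int.toStr p.2))
      parts ++ [if nuc_qual_spec ≠ "" then "nuc+" ++ nuc_qual_spec ++ ":" ++ nucs else "nuc+:" ++ nucs]
    else parts
  let parts :=
    if !msp_intervals.isEmpty then
      let msps := PySem.Str.join "," (msp_intervals.map (fun p => PySem.Int.toStr (p.1 + 1) ++ "-" ++ PySem.Int.toStr p.2))
      parts ++ ["msp+:" ++ msps]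
    else parts
  let parts :=
    if !tf_intervals.isEmpty then
      let tfs := PySem.Str.join "," (tf_intervals.map (fun p => PySem.Int.toStr (p.1 + 1) ++ "-" ++ PySem.Int.toStr p.2))
      parts ++ [if tf_qual_spec ≠ "" then "tf+" ++ tf_qual_spec ++ ":" ++ tfs else "tf+:" ++ tfs]
    else parts
  PySem.Str.join ";" parts

-- ===== PORT B =====
-- back-to-front recursive construction: no parts list, no join
def pvSpansB : List (Int × Int) → String
  | [] => ""
  | (s, l) :: rest =>
    let head := PySem.Int.toStr (s + 1) ++ "-" ++ PySem.Int.toStr l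
    if rest.isEmpty then head else head ++ "," ++ pvSpansB rest

def pvSectionB (prefix_ : String) (ivs : List (Int × Int)) (qual : String) (suffix : String) : String :=
  if ivs.isEmpty then suffix
  else ";" ++ prefix_ ++ "+" ++ qual ++ ":" ++ pvSpansB ivs ++ suffix

def format_ma_tag_alt (read_length : Int) (nuc_intervals : List (Int × Int)) (msp_intervals : List (Int × Int)) (tf_intervals : List (Int × Int)) (nuc_qual_spec : String) (tf_qual_spec : String) : String :=
  let tail := pvSectionB "tf" tf_intervals tf_qual_spec ""
  let tail := pvSectionB "msp" msp_intervals "" tail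
  let tail := pvSectionB "nuc" nuc_intervals nuc_qual_spec tail
  PySem.Int.toStr read_length ++ tail


-- ===== PRECONDITION & SPEC =====
def Spec_format_ma_tag (read_length : Int) (nuc_intervals : List (Int × Int)) (msp_intervals : List (Int × Int)) (tf_intervals : List (Int × Int)) (nuc_qual_spec : String) (tf_qual_spec : String) (out : String) : Prop := out = format_ma_tag_alt read_length nuc_intervals msp_intervals tf_intervals nuc_qual_spec tf_qual_spec
instance (read_length : Int) (nuc_intervals : List (Int × Int)) (msp_intervals : List (Int × Int)) (tf_intervals : List (Int × Int)) (nuc_qual_spec : String) (tf_qual_spec : String) (out : String) : Decidable (Spec_format_ma_tag read_length nuc_intervals msp_intervals tf_intervals nuc_qual_spec tf_qual_spec out) := by unfold Spec_format_ma_tag; infer_instance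

-- ===== CLAIM (what is proved, stated in full; the proofs are below) =====
def Claim_equal_format_ma_tag : Prop := ∀ (read_length : Int) (nuc_intervals : List (Int × Int)) (msp_intervals : List (Int × Int)) (tf_intervals : List (Int × Int)) (nuc_qual_spec : String) (tf_qual_spec : String), Dom_format_ma_tag read_length nuc_intervals msp_intervals tf_intervals nuc_qual_spec tf_qual_spec → Spec_format_ma_tag read_length nuc_intervals msp_intervals tf_intervals nuc_qual_spec tf_qual_spec (format_ma_tag read_length nuc_intervals msp_intervals tf_intervals nuc_qual_spec tf_qual_spec)

-- ===== LEMMAS AND PROOFS =====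


theorem pvJoinSingleton (sep s : String) : PySem.Str.join sep [s] = s := by
  simp [PySem.Str.join, PySem.Chars.join_singleton]

theorem pvJoinCons (sep a b : String) (l : List String) :
    PySem.Str.join sep (a :: b :: l) = a ++ sep ++ PySem.Str.join sep (b :: l) := by
  simp [PySem.Str.join, PySem.Chars.join_cons_cons, String.append_assoc]

-- body equality: recursive spans = ','.join over the map
theorem pvSpansB_eq (ivs : List (Int × Int)) :
    pvSpansB ivs = PySem.Str.join "," (ivs.map (fun p => PySem.Int.toStr (p.1 + 1) ++ "-" ++ PySem.Int.toStr p.2)) := by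
  induction ivs with
  | nil => rfl
  | cons h t ih =>
    cases t with
    | nil => simp [pvSpansB, pvJoinSingleton]
    | cons h2 t2 =>
      simp only [pvSpansB, List.isEmpty_cons, List.map] at ih ⊢
      rw [ih]
      simp only [pvJoinCons]
      simp [String.append_assoc]

theorem pvLit1 (x : String) : ";" ++ ("nuc+:" ++ x) = ";nuc+:" ++ x := rfl
theorem pvLit2 (x : String) : ";" ++ ("nuc+" ++ x) = ";nuc+" ++ x := rfl
theorem pvLit3 (x : String) : ";" ++ ("msp+:" ++ x) = ";msp+:" ++ x := rfl
theorem pvLit4 (x : String) : ";" ++ ("tf+:" ++ x) = ";tf+:" ++ x := rfl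
theorem pvLit5 (x : String) : ";" ++ ("tf+" ++ x) = ";tf+" ++ x := rfl

-- ===== VERDICT (by name: the statement is the Claim_ definition above) =====
theorem format_ma_tag_spec : Claim_equal_format_ma_tag := by
  intro rl n m t nq tq _
  unfold Spec_format_ma_tag format_ma_tag format_ma_tag_alt pvSectionB
  simp only [← pvSpansB_eq]
  cases n <;> cases m <;> cases t <;>
    by_cases hnq : nq = "" <;> by_cases htq : tq = "" <;>
      simp_all [pvJoinSingleton, pvJoinCons, String.append_assoc, pvLit1, pvLit2, pvLit3, pvLit4, pvLit5]
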